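-- pv_equiv track=rewrite | github.com/soyrochus/wormhole | wormhole/segmenter.py | _tokenise_preserving_whitespace
-- ===== SOURCE A (Python) =====
-- from typing import List, Sequence
--
-- def _tokenise_preserving_whitespace(text: str) -> List[str]:
--     """Tokenise text into word+space tokens without losing whitespace."""
--
--     tokens: List[str] = []
--     idx = 0
--     length = len(text)
--     while idx < length:
--         if text[idx].isspace():
--             start = idx
--             while idx < length and text[idx].isspace():
--                 idx += 1
--             tokens.append(text[start:idx])
--         else:
--             start = idx
--             while idx < length and not text[idx].isspace():
--                 idx += 1
--             end = idx
--             while idx < length and text[idx].isspace():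
--                 idx += 1
--             tokens.append(text[start:idx])
--     return tokens
-- ===== SOURCE B (Python) =====
-- from typing import List, Sequence
--
--
-- def _runs(text: str) -> List[tuple]:
--     """Split text into maximal runs of same-kind chars: (is_space, run)."""
--     segs: List[tuple] = []
--     i = 0
--     n = len(text)
--     while i < n:
--         k = text[i].isspace()
--         j = i + 1
--         while j < n and text[j].isspace() == k:
--             j += 1
--         segs.append((k, text[i:j]))
--         i = j
--     return segs
--
--
-- def _tokenise_preserving_whitespace(text: str) -> List[str]:
--     # Phase 1: uniform run-length segmentation; Phase 2: merge each word
--     # segment with the whitespace segment that follows it.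
--     segs = _runs(text)
--     tokens: List[str] = []
--     i = 0
--     while i < len(segs):
--         k, run = segs[i]
--         if not k and i + 1 < len(segs) and segs[i + 1][0]:
--             tokens.append(run + segs[i + 1][1])
--             i += 2
--         else:
--             tokens.append(run)
--             i += 1
--     return tokens
-- ===== Notes on version B (the rewrite author's own statement) =====
-- stated objective: alternative
-- what changed: B first segments the text into maximal same-kind runs (a uniform run-length pass) and then a second merge pass glues each word run to the whitespace run that follows it, instead of A's single interleaved index loop that conditionally scans word-then-trailing-whitespace while building tokens.
import Mathlib
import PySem

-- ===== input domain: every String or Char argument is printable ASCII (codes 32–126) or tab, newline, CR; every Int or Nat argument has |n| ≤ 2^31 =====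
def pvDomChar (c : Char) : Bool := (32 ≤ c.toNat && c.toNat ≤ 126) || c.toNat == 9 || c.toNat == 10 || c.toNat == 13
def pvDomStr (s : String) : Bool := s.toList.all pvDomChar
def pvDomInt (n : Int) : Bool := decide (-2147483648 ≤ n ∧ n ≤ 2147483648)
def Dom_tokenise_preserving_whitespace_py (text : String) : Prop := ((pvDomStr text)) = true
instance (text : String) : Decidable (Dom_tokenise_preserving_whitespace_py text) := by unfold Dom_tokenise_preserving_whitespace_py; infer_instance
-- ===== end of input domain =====

-- B is an alternative decomposition (run-length segmentation, then a merge pass), not faster;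
-- both ports are about the return value only (neither Python mutates its argument).

-- ===== PORT A =====
-- A's outer while with its three inner scanning whiles, as structural recursion on the
-- character list: each inner `while` advancing idx is the corresponding takeWhile/dropWhile.
def pvTokA : List Char → List String
  | [] => []
  | c :: cs =>
    if PySem.Chars.isspace c then
      -- leading-whitespace branch: scan the whitespace run
      String.mk ((c :: cs).takeWhile PySem.Chars.isspace) ::
        pvTokA ((c :: cs).dropWhile PySem.Chars.isspace)
    else
      -- word branch: scan the word, then the trailing whitespace, emit both as one token
      String.mk ((c :: cs).takeWhile (fun x => !PySem.Chars.isspace x) ++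
          ((c :: cs).dropWhile (fun x => !PySem.Chars.isspace x)).takeWhile PySem.Chars.isspace) ::
        pvTokA (((c :: cs).dropWhile (fun x => !PySem.Chars.isspace x)).dropWhile PySem.Chars.isspace)
  termination_by cs => cs.length
  decreasing_by
  · rename_i h
    simp only [List.dropWhile_cons, h, if_pos]
    exact Nat.lt_succ_of_le (List.length_dropWhile_le _ _)
  · rename_i h
    simp only [List.dropWhile_cons, h, Bool.not_false, if_pos]
    exact Nat.lt_succ_of_le (Nat.le_trans (List.length_dropWhile_le _ _) (List.length_dropWhile_le _ _))

def tokenise_preserving_whitespace_py (text : String) : List String :=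
  pvTokA text.toList

-- ===== PORT B =====
-- Source B phase 1 (_runs): maximal runs of same-kind characters, each run scanned by the inner while.
def pvRuns : List Char → List (Bool × List Char)
  | [] => []
  | c :: cs =>
    let k := PySem.Chars.isspace c
    (k, c :: cs.takeWhile (fun x => PySem.Chars.isspace x == k)) ::
      pvRuns (cs.dropWhile (fun x => PySem.Chars.isspace x == k))
  termination_by cs => cs.length
  decreasing_by exact Nat.lt_succ_of_le (List.length_dropWhile_le _ _)

-- Source B phase 2: the index loop with its one-segment lookahead, as recursion on the segment list.
def pvMerge : List (Bool × List Char) → List String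
  | [] => []
  | (false, w) :: (true, s) :: rest => String.mk (w ++ s) :: pvMerge rest
  | (_, w) :: rest => String.mk w :: pvMerge rest

def tokenise_preserving_whitespace_py_alt (text : String) : List String :=
  pvMerge (pvRuns text.toList)

-- ===== PRECONDITION & SPEC =====
def Spec_tokenise_preserving_whitespace_py (text : String) (out : List String) : Prop := out = tokenise_preserving_whitespace_py_alt text
instance (text : String) (out : List String) : Decidable (Spec_tokenise_preserving_whitespace_py text out) := by unfold Spec_tokenise_preserving_whitespace_py; infer_instance

-- ===== CLAIM (what is proved, stated in full; the proofs are below) =====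
def Claim_equal_tokenise_preserving_whitespace_py : Prop := ∀ (text : String), Dom_tokenise_preserving_whitespace_py text → Spec_tokenise_preserving_whitespace_py text (tokenise_preserving_whitespace_py text)

-- ===== LEMMAS AND PROOFS =====

theorem pvHead_dropWhile {p : Char → Bool} {l : List Char} {d : Char} {ds : List Char}
    (h : l.dropWhile p = d :: ds) : p d = false := by
  induction l with
  | nil => simp at h
  | cons a t ih =>
    rw [List.dropWhile_cons] at h
    split at h
    · exact ih h
    · injection h with h1 _
      subst h1
      simpa using ‹¬ p a = true›

theorem pvMerge_true (w : List Char) (rest : List (Bool × List Char)) :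
    pvMerge ((true, w) :: rest) = String.mk w :: pvMerge rest := by
  cases rest with
  | nil => rfl
  | cons p rs => rcases p with ⟨b, s⟩; cases b <;> rfl

theorem pvMerge_false_nil (w : List Char) : pvMerge [(false, w)] = [String.mk w] := rfl

theorem pvMerge_false_true (w s : List Char) (rest : List (Bool × List Char)) :
    pvMerge ((false, w) :: (true, s) :: rest) = String.mk (w ++ s) :: pvMerge rest := rfl

theorem pvTokA_eq_merge_runs : ∀ (cs : List Char), pvTokA cs = pvMerge (pvRuns cs) := by
  intro cs
  induction cs using pvTokA.induct with
  | case1 => simp [pvTokA, pvRuns, pvMerge]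
  | case2 c cs hsp ih =>
    rw [pvTokA, pvRuns, if_pos hsp, hsp]
    have ht : (fun x => PySem.Chars.isspace x == true) = PySem.Chars.isspace := by
      funext x; cases PySem.Chars.isspace x <;> rfl
    rw [ht, pvMerge_true]
    have hw : (c :: cs).takeWhile PySem.Chars.isspace = c :: cs.takeWhile PySem.Chars.isspace := by
      rw [List.takeWhile_cons, if_pos hsp]
    have hr : (c :: cs).dropWhile PySem.Chars.isspace = cs.dropWhile PySem.Chars.isspace := by
      rw [List.dropWhile_cons, if_pos hsp]
    rw [hw, hr]
    rw [hr] at ih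
    exact congrArg₂ _ rfl ih
  | case3 c cs hsp ih =>
    have hb : PySem.Chars.isspace c = false := by simpa using hsp
    rw [pvTokA, pvRuns, if_neg hsp, hb]
    have ht : (fun x => PySem.Chars.isspace x == false) = (fun x => !PySem.Chars.isspace x) := by
      funext x; cases PySem.Chars.isspace x <;> rfl
    rw [ht]
    have hw : (c :: cs).takeWhile (fun x => !PySem.Chars.isspace x)
        = c :: cs.takeWhile (fun x => !PySem.Chars.isspace x) := by
      rw [List.takeWhile_cons]; simp [hb]
    have hr : (c :: cs).dropWhile (fun x => !PySem.Chars.isspace x)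
        = cs.dropWhile (fun x => !PySem.Chars.isspace x) := by
      rw [List.dropWhile_cons]; simp [hb]
    rw [hw, hr]
    rw [hr] at ih
    rcases hrest : cs.dropWhile (fun x => !PySem.Chars.isspace x) with _ | ⟨d, ds⟩
    · rw [pvRuns, pvMerge_false_nil]
      simp only [List.takeWhile_nil, List.dropWhile_nil, List.append_nil]
      rw [show pvTokA [] = [] from by rw [pvTokA]]
    · have hd : PySem.Chars.isspace d = true := by simpa using pvHead_dropWhile hrest
      rw [pvRuns, hd]
      have ht2 : (fun x => PySem.Chars.isspace x == true) = PySem.Chars.isspace := by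
        funext x; cases PySem.Chars.isspace x <;> rfl
      rw [ht2, pvMerge_false_true]
      have hw2 : (d :: ds).takeWhile PySem.Chars.isspace = d :: ds.takeWhile PySem.Chars.isspace := by
        rw [List.takeWhile_cons, if_pos hd]
      have hr2 : (d :: ds).dropWhile PySem.Chars.isspace = ds.dropWhile PySem.Chars.isspace := by
        rw [List.dropWhile_cons, if_pos hd]
      rw [hw2]
      rw [hrest, hr2] at ih
      rw [hr2]
      exact congrArg₂ _ rfl ih

-- ===== VERDICT (by name: the statement is the Claim_ definition above) =====
theorem tokenise_preserving_whitespace_py_spec : Claim_equal_tokenise_preserving_whitespace_py := by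
  intro text _
  unfold Spec_tokenise_preserving_whitespace_py tokenise_preserving_whitespace_py tokenise_preserving_whitespace_py_alt
  exact pvTokA_eq_merge_runs text.toList
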